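-- pv_equiv track=rewrite | github.com/Faisal49A/AIAgent | gmail_test.py | clean_email
-- ===== SOURCE A (Python) =====
-- def clean_email(text):
--     lines = text.split("\n")
--     clean_lines = []
--
--     for line in lines:
--         line = line.strip()
--
--         if not line:
--             continue
--         if line.startswith(">"):
--             continue
--         if "unsubscribe" in line.lower():
--             continue
--         if "sent from my" in line.lower():
--             continue
--         if "wrote:" in line.lower():
--             break  # stop at old thread
--
--         clean_lines.append(line)
--
--     return "\n".join(clean_lines)
-- ===== SOURCE B (Python) =====
-- def _skip(line):
--     low = line.lower()
--     return (not line or line.startswith(">")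
--             or "unsubscribe" in low or "sent from my" in low)
--
--
-- def clean_email(text):
--     stripped = [line.strip() for line in text.split("\n")]
--     stop = next((i for i, line in enumerate(stripped)
--                  if not _skip(line) and "wrote:" in line.lower()),
--                 len(stripped))
--     return "\n".join(line for line in stripped[:stop] if not _skip(line))
-- ===== Notes on version B (the rewrite author's own statement) =====
-- stated objective: alternative
-- what changed: B strips all lines once, computes the stop boundary (first non-skipped line containing 'wrote:') as an index with next/enumerate, then filters the prefix with a single skip predicate and joins — two shaped passes instead of A's one early-breaking loop with four sequential continue guards.
import Mathlib
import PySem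

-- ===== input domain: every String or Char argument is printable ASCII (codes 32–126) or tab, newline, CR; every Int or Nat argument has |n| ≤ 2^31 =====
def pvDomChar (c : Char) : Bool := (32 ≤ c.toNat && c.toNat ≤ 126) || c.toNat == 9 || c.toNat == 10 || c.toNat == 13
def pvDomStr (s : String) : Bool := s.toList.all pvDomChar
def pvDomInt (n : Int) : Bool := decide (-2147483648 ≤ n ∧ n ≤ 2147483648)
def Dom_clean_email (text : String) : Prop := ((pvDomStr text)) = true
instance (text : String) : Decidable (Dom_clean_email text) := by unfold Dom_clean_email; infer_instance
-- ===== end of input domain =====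

-- B computes the stop boundary first and then filters the prefix (two shaped passes)
-- instead of A's single early-breaking loop; objective: alternative decomposition, same cost.

-- ===== PORT A =====
-- A's for-loop with continue/break: structural recursion over the lines with accumulator
def cleanLoopA : List (List Char) → List (List Char) → List (List Char)
  | [], acc => acc
  | l :: rest, acc =>
    let s := PySem.Chars.strip l
    if s.isEmpty then cleanLoopA rest acc
    else if PySem.Chars.startswith s ">".toList then cleanLoopA rest acc
    else if PySem.Chars.isIn "unsubscribe".toList (PySem.Chars.lower s) then cleanLoopA rest acc
    else if PySem.Chars.isIn "sent from my".toList (PySem.Chars.lower s) then cleanLoopA rest acc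
    else if PySem.Chars.isIn "wrote:".toList (PySem.Chars.lower s) then acc  -- break
    else cleanLoopA rest (acc ++ [s])

def clean_email (text : String) : String :=
  let lines := PySem.Chars.splitOn text.toList "\n".toList
  String.ofList (PySem.Chars.join "\n".toList (cleanLoopA lines []))

-- ===== PORT B =====
def skipB (s : List Char) : Bool :=
  let low := PySem.Chars.lower s
  s.isEmpty || PySem.Chars.startswith s ">".toList
    || PySem.Chars.isIn "unsubscribe".toList low
    || PySem.Chars.isIn "sent from my".toList low

-- next((i for i, line in enumerate(stripped) if …), len(stripped))
def stopB : List (List Char) → Nat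
  | [] => 0
  | s :: rest =>
    if !skipB s && PySem.Chars.isIn "wrote:".toList (PySem.Chars.lower s) then 0
    else stopB rest + 1

def clean_email_alt (text : String) : String :=
  let stripped := (PySem.Chars.splitOn text.toList "\n".toList).map PySem.Chars.strip
  let stop := stopB stripped
  String.ofList (PySem.Chars.join "\n".toList ((stripped.take stop).filter (fun s => !skipB s)))

-- ===== PRECONDITION & SPEC =====
def Spec_clean_email (text : String) (out : String) : Prop := out = clean_email_alt text
instance (text : String) (out : String) : Decidable (Spec_clean_email text out) := by unfold Spec_clean_email; infer_instance

-- ===== CLAIM (what is proved, stated in full; the proofs are below) =====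
def Claim_equal_clean_email : Prop := ∀ (text : String), Dom_clean_email text → Spec_clean_email text (clean_email text)

-- ===== LEMMAS AND PROOFS =====
lemma cleanLoopA_eq (ls : List (List Char)) (acc : List (List Char)) :
    cleanLoopA ls acc =
      acc ++ ((ls.map PySem.Chars.strip).take (stopB (ls.map PySem.Chars.strip))).filter
        (fun s => !skipB s) := by
  induction ls generalizing acc with
  | nil => simp [cleanLoopA, stopB]
  | cons l rest ih =>
    simp only [cleanLoopA, List.map_cons]
    set s := PySem.Chars.strip l with hs
    by_cases h1 : s.isEmpty
    · simp [stopB, skipB, h1, ih]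
    · by_cases h2 : PySem.Chars.startswith s ['>']
      · simp [stopB, skipB, h1, h2, ih]
      · by_cases h3 : PySem.Chars.isIn ['u','n','s','u','b','s','c','r','i','b','e'] (PySem.Chars.lower s)
        · simp [stopB, skipB, h1, h2, h3, ih]
        · by_cases h4 : PySem.Chars.isIn ['s','e','n','t',' ','f','r','o','m',' ','m','y'] (PySem.Chars.lower s)
          · simp [stopB, skipB, h1, h2, h3, h4, ih]
          · by_cases h5 : PySem.Chars.isIn ['w','r','o','t','e',':'] (PySem.Chars.lower s)
            · simp [stopB, skipB, h1, h2, h3, h4, h5]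
            · simp [stopB, skipB, h1, h2, h3, h4, h5, ih]

-- ===== VERDICT (by name: the statement is the Claim_ definition above) =====
theorem clean_email_spec : Claim_equal_clean_email := by
  intro text _
  unfold Spec_clean_email
  simp [clean_email, clean_email_alt, cleanLoopA_eq]
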